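-- pv_equiv track=rewrite | github.com/grotyx/research-graphDB | scripts/import_topics_4to7.py | infer_evidence_level
-- ===== SOURCE A (Python) =====
-- EVIDENCE_MAP = {
--     "Meta-Analysis": "1a",
--     "Systematic Review": "1a",
--     "Systematic review": "1a",
--     "meta-analysis": "1a",
--     "systematic-review": "1a",
--     "Randomized Controlled Trial": "1b",
--     "RCT": "1b",
--     "Equivalence Trial": "1b",
--     "Clinical Trial": "2a",
--     "Clinical Trial, Phase II": "2a",
--     "Prospective Cohort Study": "2a",
--     "prospective-cohort": "2a",
--     "Multicenter Study": "2a",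
--     "Retrospective Cohort Study": "2b",
--     "retrospective-cohort": "2b",
--     "Observational Study": "2b",
--     "Comparative Study": "2b",
--     "Case Series": "3",
--     "case-series": "3",
--     "Case Reports": "4",
--     "case-report": "4",
--     "Review": "4",
--     "Expert Opinion": "4",
--     "expert-opinion": "4",
-- }
--
-- def infer_evidence_level(article_types: list, title: str, extracted_level: str = "") -> str:
--     """Infer evidence level from article types and title."""
--     # Check extracted level first
--     if extracted_level and extracted_level in ("1a", "1b", "2a", "2b", "3", "4", "5"):
--         return extracted_level
--
--     # Check article types (priority order)
--     priority_order = [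
--         "Meta-Analysis", "Systematic Review", "Randomized Controlled Trial",
--         "Equivalence Trial", "Clinical Trial, Phase II", "Clinical Trial",
--         "Multicenter Study", "Observational Study", "Comparative Study",
--         "Case Reports", "Review",
--     ]
--     for at in priority_order:
--         if at in article_types:
--             return EVIDENCE_MAP.get(at, "4")
--
--     # Title fallback
--     t = title.lower()
--     if "meta-analysis" in t or "meta analysis" in t:
--         return "1a"
--     if "systematic review" in t:
--         return "1a"
--     if "randomized" in t or "randomised" in t:
--         return "1b"
--     if "prospective" in t:
--         return "2a"
--     if "retrospective" in t:
--         return "2b"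
--     if "case report" in t:
--         return "4"
--     if "finite element" in t or "biomechan" in t or "cadaver" in t:
--         return "5"
--
--     return "4"
-- ===== SOURCE B (Python) =====
-- # B: single pass over article_types with a precomputed rank table (min-rank wins),
-- # plus a data-driven title rule list, instead of A's scan over the priority list.
-- _RANK = {
--     "Meta-Analysis": 0, "Systematic Review": 1, "Randomized Controlled Trial": 2,
--     "Equivalence Trial": 3, "Clinical Trial, Phase II": 4, "Clinical Trial": 5,
--     "Multicenter Study": 6, "Observational Study": 7, "Comparative Study": 8,
--     "Case Reports": 9, "Review": 10,
-- }
-- _LEVELS = ["1a", "1a", "1b", "1b", "2a", "2a", "2a", "2b", "2b", "4", "4"]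
-- _TITLE_RULES = [
--     (["meta-analysis", "meta analysis"], "1a"),
--     (["systematic review"], "1a"),
--     (["randomized", "randomised"], "1b"),
--     (["prospective"], "2a"),
--     (["retrospective"], "2b"),
--     (["case report"], "4"),
--     (["finite element", "biomechan", "cadaver"], "5"),
-- ]
--
-- def infer_evidence_level(article_types: list, title: str, extracted_level: str = "") -> str:
--     """Infer evidence level from article types and title."""
--     if extracted_level in ("1a", "1b", "2a", "2b", "3", "4", "5"):
--         return extracted_level
--     best = None
--     for a in article_types:
--         r = _RANK.get(a)
--         if r is not None and (best is None or r < best):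
--             best = r
--     if best is not None:
--         return _LEVELS[best]
--     t = title.lower()
--     for subs, level in _TITLE_RULES:
--         if any(s in t for s in subs):
--             return level
--     return "4"
-- ===== Notes on version B (the rewrite author's own statement) =====
-- stated objective: alternative
-- what changed: Replaces A's scan over the 11-entry priority list (a membership test over article_types per priority type) by a single pass over article_types keeping the minimum rank from a precomputed rank table, and replaces the hard-coded title if-chain by a data-driven (substrings, level) rule list.
import Mathlib
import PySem

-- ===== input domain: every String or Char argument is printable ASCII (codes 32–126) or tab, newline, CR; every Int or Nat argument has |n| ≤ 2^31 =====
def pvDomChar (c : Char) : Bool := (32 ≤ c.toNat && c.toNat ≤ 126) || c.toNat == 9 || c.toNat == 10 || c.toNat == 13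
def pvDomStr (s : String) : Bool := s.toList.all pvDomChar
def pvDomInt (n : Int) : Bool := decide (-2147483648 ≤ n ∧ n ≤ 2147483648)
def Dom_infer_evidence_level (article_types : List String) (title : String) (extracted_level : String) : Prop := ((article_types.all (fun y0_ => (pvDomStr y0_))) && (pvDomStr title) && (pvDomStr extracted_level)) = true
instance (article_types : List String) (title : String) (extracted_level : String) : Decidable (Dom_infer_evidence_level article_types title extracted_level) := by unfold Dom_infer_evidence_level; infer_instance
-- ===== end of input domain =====

-- B replaces A's scan over the priority list (first priority type present) by one pass over
-- article_types keeping the minimum rank from a precomputed rank table, and replaces A's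
-- hard-coded title if-chain by a data-driven rule list; objective: alternative structure.

-- ===== PORT A =====
def pvEvidenceMap : PySem.Dict String String := PySem.Dict.ofList [
  ("Meta-Analysis", "1a"), ("Systematic Review", "1a"), ("Systematic review", "1a"),
  ("meta-analysis", "1a"), ("systematic-review", "1a"),
  ("Randomized Controlled Trial", "1b"), ("RCT", "1b"), ("Equivalence Trial", "1b"),
  ("Clinical Trial", "2a"), ("Clinical Trial, Phase II", "2a"),
  ("Prospective Cohort Study", "2a"), ("prospective-cohort", "2a"), ("Multicenter Study", "2a"),
  ("Retrospective Cohort Study", "2b"), ("retrospective-cohort", "2b"),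
  ("Observational Study", "2b"), ("Comparative Study", "2b"),
  ("Case Series", "3"), ("case-series", "3"),
  ("Case Reports", "4"), ("case-report", "4"), ("Review", "4"),
  ("Expert Opinion", "4"), ("expert-opinion", "4")]

def pvPriorityOrder : List String := [
  "Meta-Analysis", "Systematic Review", "Randomized Controlled Trial",
  "Equivalence Trial", "Clinical Trial, Phase II", "Clinical Trial",
  "Multicenter Study", "Observational Study", "Comparative Study",
  "Case Reports", "Review"]

-- the 'for at in priority_order' loop: first priority type contained in article_types
def pvScanPriority (article_types : List String) : List String → Option String
  | [] => none
  | p :: rest =>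
    if article_types.contains p then some (pvEvidenceMap.getD p "4")
    else pvScanPriority article_types rest

def infer_evidence_level (article_types : List String) (title : String) (extracted_level : String) : String :=
  if extracted_level ≠ "" ∧ ["1a", "1b", "2a", "2b", "3", "4", "5"].contains extracted_level then
    extracted_level
  else
    match pvScanPriority article_types pvPriorityOrder with
    | some lvl => lvl
    | none =>
      let t := PySem.Str.lower title
      if PySem.Str.isIn "meta-analysis" t || PySem.Str.isIn "meta analysis" t then "1a"
      else if PySem.Str.isIn "systematic review" t then "1a"
      else if PySem.Str.isIn "randomized" t || PySem.Str.isIn "randomised" t then "1b"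
      else if PySem.Str.isIn "prospective" t then "2a"
      else if PySem.Str.isIn "retrospective" t then "2b"
      else if PySem.Str.isIn "case report" t then "4"
      else if PySem.Str.isIn "finite element" t || PySem.Str.isIn "biomechan" t || PySem.Str.isIn "cadaver" t then "5"
      else "4"

-- ===== PORT B =====
def pvRankDict : PySem.Dict String Nat := PySem.Dict.ofList [
  ("Meta-Analysis", 0), ("Systematic Review", 1), ("Randomized Controlled Trial", 2),
  ("Equivalence Trial", 3), ("Clinical Trial, Phase II", 4), ("Clinical Trial", 5),
  ("Multicenter Study", 6), ("Observational Study", 7), ("Comparative Study", 8),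
  ("Case Reports", 9), ("Review", 10)]

def pvLevels : List String := ["1a", "1a", "1b", "1b", "2a", "2a", "2a", "2b", "2b", "4", "4"]

def pvTitleRules : List (List String × String) := [
  (["meta-analysis", "meta analysis"], "1a"),
  (["systematic review"], "1a"),
  (["randomized", "randomised"], "1b"),
  (["prospective"], "2a"),
  (["retrospective"], "2b"),
  (["case report"], "4"),
  (["finite element", "biomechan", "cadaver"], "5")]

-- the 'for a in article_types' loop: fold keeping the smallest rank seen
def pvBestRank (article_types : List String) : Option Nat :=
  article_types.foldl (fun best a =>
    match pvRankDict.get? a with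
    | none => best
    | some r => match best with
      | none => some r
      | some b => if r < b then some r else best) none

-- the 'for subs, level in _TITLE_RULES' loop
def pvTitleScan (t : String) : List (List String × String) → String
  | [] => "4"
  | (subs, lvl) :: rest =>
    if subs.any (fun s => PySem.Str.isIn s t) then lvl else pvTitleScan t rest

def infer_evidence_level_alt (article_types : List String) (title : String) (extracted_level : String) : String :=
  if ["1a", "1b", "2a", "2b", "3", "4", "5"].contains extracted_level then
    extracted_level
  else
    match pvBestRank article_types with
    | some r => pvLevels.getD r "4"   -- _LEVELS[best]; best is always a valid index 0..10
    | none => pvTitleScan (PySem.Str.lower title) pvTitleRules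

-- ===== PRECONDITION & SPEC =====
def Spec_infer_evidence_level (article_types : List String) (title : String) (extracted_level : String) (out : String) : Prop := out = infer_evidence_level_alt article_types title extracted_level
instance (article_types : List String) (title : String) (extracted_level : String) (out : String) : Decidable (Spec_infer_evidence_level article_types title extracted_level out) := by unfold Spec_infer_evidence_level; infer_instance

-- ===== CLAIM (what is proved, stated in full; the proofs are below) =====
def Claim_equal_infer_evidence_level : Prop := ∀ (article_types : List String) (title : String) (extracted_level : String), Dom_infer_evidence_level article_types title extracted_level → Spec_infer_evidence_level article_types title extracted_level (infer_evidence_level article_types title extracted_level)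

-- ===== LEMMAS AND PROOFS =====

-- the fold step used by pvBestRank, named so the lemmas can speak about it
def pvStep (best : Option Nat) (a : String) : Option Nat :=
  match pvRankDict.get? a with
  | none => best
  | some r => match best with
    | none => some r
    | some b => if r < b then some r else best

theorem pvBestRank_eq_foldl (l : List String) : pvBestRank l = l.foldl pvStep none := rfl

theorem step_none (b : Option Nat) (a : String) :
    pvStep b a = none ↔ b = none ∧ pvRankDict.get? a = none := by
  unfold pvStep
  cases pvRankDict.get? a <;> cases b <;> simp
  split <;> simp

theorem step_some_cases (b : Option Nat) (a : String) (r : Nat) (h : pvStep b a = some r) :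
    b = some r ∨ pvRankDict.get? a = some r := by
  unfold pvStep at h
  cases hr : pvRankDict.get? a with
  | none => rw [hr] at h; exact Or.inl h
  | some r' =>
    rw [hr] at h
    cases b with
    | none => exact Or.inr h
    | some b' =>
      by_cases hlt : r' < b' <;> simp only [hlt, if_true, if_false] at h
      · exact Or.inr h
      · exact Or.inl h

theorem step_le (b' : Nat) (a : String) :
    ∃ b'', pvStep (some b') a = some b'' ∧ b'' ≤ b' := by
  unfold pvStep
  cases hr : pvRankDict.get? a with
  | none => exact ⟨b', rfl, le_refl _⟩
  | some r =>
    by_cases hlt : r < b'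
    · exact ⟨r, by simp [hlt], le_of_lt hlt⟩
    · exact ⟨b', by simp [hlt], le_refl _⟩

theorem step_le_rank (b : Option Nat) (a : String) (r' : Nat) (hr : pvRankDict.get? a = some r') :
    ∃ b'', pvStep b a = some b'' ∧ b'' ≤ r' := by
  unfold pvStep
  rw [hr]
  cases b with
  | none => exact ⟨r', rfl, le_refl _⟩
  | some b' =>
    by_cases hlt : r' < b'
    · exact ⟨r', by simp [hlt], le_refl _⟩
    · exact ⟨b', by simp [hlt], by omega⟩

theorem fold_none (l : List String) : ∀ (b : Option Nat),
    l.foldl pvStep b = none ↔ b = none ∧ ∀ s ∈ l, pvRankDict.get? s = none := by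
  induction l with
  | nil => intro b; simp
  | cons a l ih =>
    intro b
    rw [List.foldl_cons, ih, step_none]
    constructor
    · rintro ⟨⟨hb, ha⟩, hl⟩
      refine ⟨hb, fun s hs => ?_⟩
      rcases List.mem_cons.mp hs with rfl | hs'
      · exact ha
      · exact hl s hs'
    · rintro ⟨hb, hall⟩
      exact ⟨⟨hb, hall a (by simp)⟩, fun s hs => hall s (by simp [hs])⟩

theorem fold_some (l : List String) : ∀ (b : Option Nat) (r : Nat),
    l.foldl pvStep b = some r →
    (b = some r ∨ ∃ s ∈ l, pvRankDict.get? s = some r) ∧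
    (∀ b', b = some b' → r ≤ b') ∧
    (∀ s ∈ l, ∀ r', pvRankDict.get? s = some r' → r ≤ r') := by
  induction l with
  | nil =>
    intro b r h
    simp only [List.foldl_nil] at h
    refine ⟨Or.inl h, fun b' hb => by rw [hb] at h; injection h with h; omega, by simp⟩
  | cons a l ih =>
    intro b r h
    rw [List.foldl_cons] at h
    obtain ⟨hatt, hminb, hmins⟩ := ih (pvStep b a) r h
    refine ⟨?_, ?_, ?_⟩
    · rcases hatt with hstep | ⟨s, hs, hr⟩
      · rcases step_some_cases b a r hstep with hb | ha
        · exact Or.inl hb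
        · exact Or.inr ⟨a, by simp, ha⟩
      · exact Or.inr ⟨s, by simp [hs], hr⟩
    · intro b' hb
      subst hb
      obtain ⟨b'', hsb, hle⟩ := step_le b' a
      exact le_trans (hminb b'' hsb) hle
    · intro s hs r' hr
      rcases List.mem_cons.mp hs with rfl | hs'
      · obtain ⟨b'', hsb, hle⟩ := step_le_rank b s r' hr
        exact le_trans (hminb b'' hsb) hle
      · exact hmins s hs' r' hr

-- A's scan skips a prefix none of whose entries occur in article_types
theorem scan_skip (l : List String) : ∀ (ps qs : List String),
    (∀ q ∈ ps, l.contains q = false) →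
    pvScanPriority l (ps ++ qs) = pvScanPriority l qs := by
  intro ps
  induction ps with
  | nil => intro qs _; rfl
  | cons p ps ih =>
    intro qs hall
    rw [List.cons_append]
    rw [show pvScanPriority l (p :: (ps ++ qs)) =
        if l.contains p = true then some (pvEvidenceMap.getD p "4")
        else pvScanPriority l (ps ++ qs) from rfl]
    rw [hall p (by simp)]
    simp only [Bool.false_eq_true, if_false]
    exact ih qs (fun q hq => hall q (by simp [hq]))

theorem scan_hit (l : List String) (p : String) (qs : List String) (h : l.contains p = true) :
    pvScanPriority l (p :: qs) = some (pvEvidenceMap.getD p "4") := by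
  rw [show pvScanPriority l (p :: qs) =
      if l.contains p = true then some (pvEvidenceMap.getD p "4")
      else pvScanPriority l qs from rfl]
  rw [h]
  simp

set_option maxHeartbeats 1000000 in
-- for each priority rank, A's looked-up evidence level is B's level-table entry
theorem level_agree (r : Nat) (hr : r < 11) :
    pvEvidenceMap.getD (pvPriorityOrder.getD r "") "4" = pvLevels.getD r "4" := by
  interval_cases r <;> rfl

set_option maxHeartbeats 1000000 in
-- every priority type has its index as rank
theorem rank_mem (r : Nat) (hr : r < 11) :
    pvRankDict.get? (pvPriorityOrder.getD r "") = some r := by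
  interval_cases r <;> rfl

set_option maxHeartbeats 1000000 in
-- a ranked string is the priority type of that rank
theorem rank_shape (s : String) (r : Nat) (h : pvRankDict.get? s = some r) :
    r < 11 ∧ pvPriorityOrder.getD r "" = s := by
  have e : pvRankDict = PySem.Dict.mk [
    ("Meta-Analysis", 0), ("Systematic Review", 1), ("Randomized Controlled Trial", 2),
    ("Equivalence Trial", 3), ("Clinical Trial, Phase II", 4), ("Clinical Trial", 5),
    ("Multicenter Study", 6), ("Observational Study", 7), ("Comparative Study", 8),
    ("Case Reports", 9), ("Review", 10)] := by rfl
  rw [e] at h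
  simp only [PySem.Dict.get?_mk_cons, beq_iff_eq] at h
  split_ifs at h with h1 h2 h3 h4 h5 h6 h7 h8 h9 h10 h11 <;>
    first
      | (injection h with h; subst h; simp_all [pvPriorityOrder])
      | (simp [PySem.Dict.get?] at h)

-- the middle phase: A's priority scan and B's min-rank fold choose the same level
theorem mid_eq (l : List String) (x : String) :
    (match pvScanPriority l pvPriorityOrder with
      | some lvl => lvl
      | none => x) =
    (match pvBestRank l with
      | some r => pvLevels.getD r "4"
      | none => x) := by
  cases hb : pvBestRank l with
  | none =>
    rw [pvBestRank_eq_foldl] at hb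
    have hall := ((fold_none l none).mp hb).2
    have hcf : ∀ q ∈ pvPriorityOrder, l.contains q = false := by
      intro q hq
      cases hcq : l.contains q with
      | false => rfl
      | true =>
        exfalso
        have hqm : q ∈ l := List.contains_iff_mem.mp hcq
        have h1 := hall q hqm
        have hforall : ∀ p ∈ pvPriorityOrder, (pvRankDict.get? p).isSome := by decide
        have h2 := hforall q hq
        rw [h1] at h2
        exact Bool.noConfusion h2
    have : pvScanPriority l pvPriorityOrder = none := by
      have := scan_skip l pvPriorityOrder [] hcf
      simpa using this
    rw [this]
  | some r =>
    rw [pvBestRank_eq_foldl] at hb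
    obtain ⟨hatt, _, hmin⟩ := fold_some l none r hb
    rcases hatt with h | ⟨s, hs, hr⟩
    · exact absurd h (by simp)
    obtain ⟨hr11, hps⟩ := rank_shape s r hr
    have hmem : l.contains (pvPriorityOrder.getD r "") = true := by
      rw [hps]; exact List.contains_iff_mem.mpr hs
    have hpre : ∀ q ∈ pvPriorityOrder.take r, l.contains q = false := by
      intro q hq
      obtain ⟨i, hi, hgi⟩ := List.mem_iff_getElem.mp hq
      have hilt : i < r := by
        have := hi; simp only [List.length_take] at this; omega
      cases hcq : l.contains q with
      | false => rfl
      | true =>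
      exfalso
      have hqm : q ∈ l := List.contains_iff_mem.mp hcq
      have hq_rank : pvRankDict.get? q = some i := by
        have : pvPriorityOrder.getD i "" = q := by
          rw [List.getD_eq_getElem _ _ (by simp [pvPriorityOrder]; omega)]
          rw [← hgi]
          simp [List.getElem_take]
        rw [← this]
        exact rank_mem i (by omega)
      have := hmin q hqm i hq_rank
      omega
    have hsplit : pvPriorityOrder = pvPriorityOrder.take r ++
        (pvPriorityOrder.getD r "" :: pvPriorityOrder.drop (r + 1)) := by
      rw [List.getD_eq_getElem _ _ (by simp [pvPriorityOrder]; omega)]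
      rw [← List.drop_eq_getElem_cons (by simp [pvPriorityOrder]; omega)]
      exact (List.take_append_drop r pvPriorityOrder).symm
    calc (match pvScanPriority l pvPriorityOrder with
          | some lvl => lvl | none => x)
        = (match pvScanPriority l (pvPriorityOrder.take r ++
            (pvPriorityOrder.getD r "" :: pvPriorityOrder.drop (r + 1))) with
          | some lvl => lvl | none => x) := by rw [← hsplit]
      _ = pvEvidenceMap.getD (pvPriorityOrder.getD r "") "4" := by
            rw [scan_skip l _ _ hpre, scan_hit l _ _ hmem]
      _ = pvLevels.getD r "4" := level_agree r hr11

-- B's rule loop = A's title if-chain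
theorem title_eq (t : String) :
    pvTitleScan t pvTitleRules =
      (if PySem.Str.isIn "meta-analysis" t || PySem.Str.isIn "meta analysis" t then "1a"
      else if PySem.Str.isIn "systematic review" t then "1a"
      else if PySem.Str.isIn "randomized" t || PySem.Str.isIn "randomised" t then "1b"
      else if PySem.Str.isIn "prospective" t then "2a"
      else if PySem.Str.isIn "retrospective" t then "2b"
      else if PySem.Str.isIn "case report" t then "4"
      else if PySem.Str.isIn "finite element" t || PySem.Str.isIn "biomechan" t || PySem.Str.isIn "cadaver" t then "5"
      else "4") := by
  simp only [pvTitleScan, pvTitleRules, List.any_cons, List.any_nil, Bool.or_false, Bool.or_assoc]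

-- ===== VERDICT (by name: the statement is the Claim_ definition above) =====
theorem infer_evidence_level_spec : Claim_equal_infer_evidence_level := by
  intro article_types title extracted_level _
  unfold Spec_infer_evidence_level infer_evidence_level infer_evidence_level_alt
  by_cases hc : ["1a", "1b", "2a", "2b", "3", "4", "5"].contains extracted_level = true
  · have hne : extracted_level ≠ "" := by
      rintro rfl; revert hc; decide
    rw [if_pos ⟨hne, hc⟩, if_pos hc]
  · have : ¬ (extracted_level ≠ "" ∧
        ["1a", "1b", "2a", "2b", "3", "4", "5"].contains extracted_level = true) := by
      rintro ⟨_, h⟩; exact hc h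
    rw [if_neg this, if_neg hc]
    refine Eq.trans ?_ (mid_eq article_types (pvTitleScan (PySem.Str.lower title) pvTitleRules))
    cases pvScanPriority article_types pvPriorityOrder
    · exact (title_eq (PySem.Str.lower title)).symm
    · rfl
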